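-- pv_equiv track=rewrite | github.com/Dibbat/BOT | mt5/.venv/mt5/pt_mt5_backtest.py | _resolve_mt5_symbol
-- ===== SOURCE A (Python) =====
-- from typing import Any, Dict, List, Optional, Tuple
--
-- def _resolve_mt5_symbol(requested_symbol: str, available: List[str]) -> Optional[str]:
--     requested = str(requested_symbol or "").strip()
--     if not requested:
--         return None
--
--     requested_upper = requested.upper()
--
--     for s in available:
--         if s.upper() == requested_upper:
--             return s
--
--     starts_with = [s for s in available if s.upper().startswith(requested_upper)]
--     if starts_with:
--         return sorted(starts_with, key=len)[0]
--
--     contains = [s for s in available if requested_upper in s.upper()]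
--     if contains:
--         return sorted(contains, key=len)[0]
--
--     return None
-- ===== SOURCE B (Python) =====
-- def _resolve_mt5_symbol(requested_symbol, available):
--     requested = str(requested_symbol or "").strip()
--     if not requested:
--         return None
--     requested_upper = requested.upper()
--     exact = best_starts = best_contains = None
--     for s in available:
--         su = s.upper()
--         if exact is None and su == requested_upper:
--             exact = s
--         if su.startswith(requested_upper) and (best_starts is None or len(s) < len(best_starts)):
--             best_starts = s
--         if requested_upper in su and (best_contains is None or len(s) < len(best_contains)):
--             best_contains = s
--     if exact is not None:
--         return exact
--     if best_starts is not None: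
--         return best_starts
--     return best_contains
-- ===== Notes on version B (the rewrite author's own statement) =====
-- stated objective: alternative
-- what changed: Replaces A's three sequential scans plus two stable sorts-by-length with a single pass that tracks the first exact match and the shortest (earliest of ties) prefix and substring matches.
import Mathlib
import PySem

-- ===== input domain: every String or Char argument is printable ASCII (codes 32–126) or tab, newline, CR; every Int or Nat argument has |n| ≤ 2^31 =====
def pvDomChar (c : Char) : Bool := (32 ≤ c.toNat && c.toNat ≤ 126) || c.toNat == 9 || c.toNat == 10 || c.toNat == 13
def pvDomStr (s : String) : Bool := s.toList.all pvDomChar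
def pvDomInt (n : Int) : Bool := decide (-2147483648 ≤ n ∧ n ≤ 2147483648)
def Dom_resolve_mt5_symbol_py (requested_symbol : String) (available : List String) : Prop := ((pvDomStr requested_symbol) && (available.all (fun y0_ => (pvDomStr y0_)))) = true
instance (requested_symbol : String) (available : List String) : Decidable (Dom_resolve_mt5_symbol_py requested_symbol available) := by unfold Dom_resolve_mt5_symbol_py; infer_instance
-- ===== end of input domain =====

-- B replaces A's three sequential scans (plus two stable sorts) by a single pass that
-- maintains the first exact match and the shortest (first of ties) prefix/substring match.

-- ===== PORT A =====
-- the 'for s in available: if s.upper() == requested_upper: return s' loop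
def pvFindExact (ru : String) : List String → Option String
  | [] => none
  | s :: t => if PySem.Str.upper s = ru then some s else pvFindExact ru t

def resolve_mt5_symbol_py (requested_symbol : String) (available : List String) : Option String :=
  -- requested = str(requested_symbol or "").strip(): on a str argument this is .strip()
  let requested := PySem.Str.strip requested_symbol
  if requested = "" then none
  else
    let requested_upper := PySem.Str.upper requested
    match pvFindExact requested_upper available with
    | some s => some s
    | none =>
      let starts_with := available.filter (fun s => PySem.Str.startswith (PySem.Str.upper s) requested_upper)
      if starts_with.isEmpty then
        let contains := available.filter (fun s => PySem.Str.isIn requested_upper (PySem.Str.upper s))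
        if contains.isEmpty then none
        else (PySem.List.sorted contains (fun s => s.length) false).head?
      else (PySem.List.sorted starts_with (fun s => s.length) false).head?

-- ===== PORT B =====
-- the body of B's single loop: update (exact, best_starts, best_contains) with s
def pvAltStep (ru : String) (st : Option String × Option String × Option String)
    (s : String) : Option String × Option String × Option String :=
  let su := PySem.Str.upper s
  let ex := match st.1 with
    | none => if su = ru then some s else none
    | some e => some e
  let bs := if PySem.Str.startswith su ru &&
      (match st.2.1 with | none => true | some b => decide (s.length < b.length))
    then some s else st.2.1
  let bc := if PySem.Str.isIn ru su &&
      (match st.2.2 with | none => true | some b => decide (s.length < b.length))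
    then some s else st.2.2
  (ex, bs, bc)

def resolve_mt5_symbol_py_alt (requested_symbol : String) (available : List String) : Option String :=
  let requested := PySem.Str.strip requested_symbol
  if requested = "" then none
  else
    let requested_upper := PySem.Str.upper requested
    let st := available.foldl (pvAltStep requested_upper) (none, none, none)
    match st.1 with
    | some e => some e
    | none =>
      match st.2.1 with
      | some b => some b
      | none => st.2.2

-- ===== PRECONDITION & SPEC =====
def Spec_resolve_mt5_symbol_py (requested_symbol : String) (available : List String) (out : Option String) : Prop := out = resolve_mt5_symbol_py_alt requested_symbol available
instance (requested_symbol : String) (available : List String) (out : Option String) : Decidable (Spec_resolve_mt5_symbol_py requested_symbol available out) := by unfold Spec_resolve_mt5_symbol_py; infer_instance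

-- ===== CLAIM (what is proved, stated in full; the proofs are below) =====
def Claim_equal_resolve_mt5_symbol_py : Prop := ∀ (requested_symbol : String) (available : List String), Dom_resolve_mt5_symbol_py requested_symbol available → Spec_resolve_mt5_symbol_py requested_symbol available (resolve_mt5_symbol_py requested_symbol available)

-- ===== LEMMAS AND PROOFS =====

-- the running 'keep the earlier element unless the new one is strictly shorter' update
def pvMinUpd (b : Option String) (s : String) : Option String :=
  match b with
  | none => some s
  | some t => if s.length < t.length then some s else b

theorem pvFold_fst (ru : String) : ∀ (xs : List String) (e bs bc : Option String),
    (xs.foldl (pvAltStep ru) (e, bs, bc)).1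
      = (match e with | some v => some v | none => pvFindExact ru xs) := by
  intro xs
  induction xs with
  | nil => intro e bs bc; cases e <;> rfl
  | cons x t ih =>
    intro e bs bc
    cases e with
    | some v =>
      simp only [List.foldl_cons, pvAltStep, ih]
    | none =>
      simp only [List.foldl_cons, pvAltStep, ih, pvFindExact]
      by_cases h : PySem.Str.upper x = ru <;> simp [h]

theorem pvFold_bs (ru : String) : ∀ (xs : List String) (e bs bc : Option String),
    (xs.foldl (pvAltStep ru) (e, bs, bc)).2.1
      = (xs.filter (fun s => PySem.Str.startswith (PySem.Str.upper s) ru)).foldl pvMinUpd bs := by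
  intro xs
  induction xs with
  | nil => intro e bs bc; rfl
  | cons x t ih =>
    intro e bs bc
    simp only [List.foldl_cons, pvAltStep, ih, List.filter_cons]
    by_cases h : PySem.Str.startswith (PySem.Str.upper x) ru = true
    · simp only [PySem.Str.startswith_eq, PySem.Str.toList_upper] at h ⊢
      simp only [h, Bool.true_and, if_true, List.foldl_cons]
      congr 1
      cases bs with
      | none => rfl
      | some b =>
        by_cases hl : x.length < b.length <;> simp [pvMinUpd, hl]
    · simp only [PySem.Str.startswith_eq, PySem.Str.toList_upper, Bool.not_eq_true] at h ⊢
      simp [h]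

theorem pvFold_bc (ru : String) : ∀ (xs : List String) (e bs bc : Option String),
    (xs.foldl (pvAltStep ru) (e, bs, bc)).2.2
      = (xs.filter (fun s => PySem.Str.isIn ru (PySem.Str.upper s))).foldl pvMinUpd bc := by
  intro xs
  induction xs with
  | nil => intro e bs bc; rfl
  | cons x t ih =>
    intro e bs bc
    simp only [List.foldl_cons, pvAltStep, ih, List.filter_cons]
    by_cases h : PySem.Str.isIn ru (PySem.Str.upper x) = true
    · simp only [PySem.Str.isIn_eq, PySem.Str.toList_upper] at h ⊢
      simp only [h, Bool.true_and, if_true, List.foldl_cons]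
      congr 1
      cases bc with
      | none => rfl
      | some b =>
        by_cases hl : x.length < b.length <;> simp [pvMinUpd, hl]
    · simp only [PySem.Str.isIn_eq, PySem.Str.toList_upper, Bool.not_eq_true] at h ⊢
      simp [h]

theorem pvHead_insertBy (x : String) (acc : List String) :
    (PySem.List.insertBy (fun a b : String => decide (a.length < b.length)) x acc).head?
      = pvMinUpd acc.head? x := by
  cases acc with
  | nil => rfl
  | cons y ys =>
    simp only [PySem.List.insertBy, pvMinUpd, List.head?_cons]
    by_cases h : x.length < y.length <;> simp [h]

theorem pvHead_foldl_ins : ∀ (xs : List String) (acc : List String),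
    (xs.foldl (fun acc x => PySem.List.insertBy (fun a b : String => decide (a.length < b.length)) x acc) acc).head?
      = xs.foldl pvMinUpd acc.head? := by
  intro xs
  induction xs with
  | nil => intro acc; rfl
  | cons x t ih =>
    intro acc
    simp only [List.foldl_cons, ih, pvHead_insertBy]

theorem pvHead_sorted (xs : List String) :
    (PySem.List.sorted xs (fun s => s.length) false).head? = xs.foldl pvMinUpd none := by
  rw [PySem.List.sorted_eq_foldl_insertBy, pvHead_foldl_ins]
  rfl

theorem pvFold_min_some : ∀ (t : List String) (s : String),
    ∃ v, t.foldl pvMinUpd (some s) = some v := by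
  intro t
  induction t with
  | nil => intro s; exact ⟨s, rfl⟩
  | cons x r ih =>
    intro s
    simp only [List.foldl_cons, pvMinUpd]
    by_cases h : x.length < s.length <;> simp [h] <;> exact ih _

-- ===== VERDICT (by name: the statement is the Claim_ definition above) =====
theorem resolve_mt5_symbol_py_spec : Claim_equal_resolve_mt5_symbol_py := by
  intro rq avail _dom
  unfold Spec_resolve_mt5_symbol_py resolve_mt5_symbol_py resolve_mt5_symbol_py_alt
  by_cases h0 : PySem.Str.strip rq = ""
  · simp [h0]
  · simp only [h0, if_false]
    set ru := PySem.Str.upper (PySem.Str.strip rq) with hru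
    rw [pvFold_fst ru avail none none none, pvFold_bs ru avail none none none,
        pvFold_bc ru avail none none none]
    cases hF : pvFindExact ru avail with
    | some s => simp
    | none =>
      simp only
      cases hsw : avail.filter (fun s => PySem.Str.startswith (PySem.Str.upper s) ru) with
      | nil =>
        simp only [List.foldl_nil, List.isEmpty_nil, if_pos]
        cases hc : avail.filter (fun s => PySem.Str.isIn ru (PySem.Str.upper s)) with
        | nil => rfl
        | cons c cs =>
          simp only [List.isEmpty_cons, pvHead_sorted, List.foldl_cons]
          have : pvMinUpd none c = some c := rfl
          rw [this]
          obtain ⟨v, hv⟩ := pvFold_min_some cs c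
          simp [hv]
      | cons b bs =>
        simp only [List.isEmpty_cons, pvHead_sorted, List.foldl_cons]
        have : pvMinUpd none b = some b := rfl
        rw [this]
        obtain ⟨v, hv⟩ := pvFold_min_some bs b
        simp [hv]
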